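-- pv_equiv track=rewrite | github.com/AaronnF/FYP | src/test_netlist_parser.py | _all_port_orderings
-- ===== SOURCE A (Python) =====
-- from typing import Dict, List, Tuple, Any, Optional
--
-- def _all_port_orderings(ports: List[str]) -> List[Dict[str, str]]:
--     if not ports:
--         return [{}]
--     orderings: List[Dict[str, str]] = []
--     head, *tail = ports
--     for rest in _all_port_orderings(tail):
--         for order in ("msb", "lsb"):
--             mapping = dict(rest)
--             mapping[head] = order
--             orderings.append(mapping)
--     return orderings
-- ===== SOURCE B (Python) =====
-- def _all_port_orderings(ports):
--     n = len(ports)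
--     out = []
--     for code in range(1 << n):
--         out.append({p: ("lsb" if (code >> i) & 1 else "msb")
--                     for i, p in reversed(list(enumerate(ports)))})
--     return out
-- ===== Notes on version B (the rewrite author's own statement) =====
-- stated objective: alternative
-- what changed: Replaces the recursive cartesian build with a direct enumeration of the 2^n bit codes: each code's bits (port 0 = least significant, 0=msb/1=lsb) are decoded into a dict comprehension over the reversed enumerated port list, yielding the same list of dicts in the same order with no recursion and no intermediate lists.
import Mathlib
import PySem

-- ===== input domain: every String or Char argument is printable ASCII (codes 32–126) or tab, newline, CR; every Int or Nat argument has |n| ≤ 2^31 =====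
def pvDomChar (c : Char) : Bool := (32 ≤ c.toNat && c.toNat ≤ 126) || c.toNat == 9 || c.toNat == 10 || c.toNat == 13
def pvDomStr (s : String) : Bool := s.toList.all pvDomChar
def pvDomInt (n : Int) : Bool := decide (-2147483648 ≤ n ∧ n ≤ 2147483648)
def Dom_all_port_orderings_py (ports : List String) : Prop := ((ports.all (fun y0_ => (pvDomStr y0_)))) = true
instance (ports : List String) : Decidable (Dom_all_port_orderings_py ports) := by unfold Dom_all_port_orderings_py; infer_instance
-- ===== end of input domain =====

-- B enumerates the 2^n orderings by decoding the bits of a counter instead of recursing over the port list; same output, no recursion (objective: alternative).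

-- ===== PORT A =====
-- literal port of A's recursion: for each ordering of the tail, append the two
-- dicts obtained by copying it and setting the head port to "msb" / "lsb"
def all_port_orderings_py : List String → List (List (String × String))
  | [] => [[]]
  | head :: tail =>
      (all_port_orderings_py tail).foldl
        (fun orderings rest =>
          ["msb", "lsb"].foldl
            (fun orderings order =>
              orderings ++ [((PySem.Dict.mk rest).insert head order).items])
            orderings)
        []

-- ===== PORT B =====
-- literal port of B: for each code in range(1 << n), build the dict comprehension
-- over reversed(list(enumerate(ports))), bit i of code choosing "lsb"/"msb" for port i
def all_port_orderings_py_alt (ports : List String) : List (List (String × String)) :=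
  (PySem.List.pyRange 0 ((1 : Int) <<< ports.length) 1).map (fun code =>
    ((PySem.List.enumerate ports 0).reverse.foldl
        (fun d ip =>
          d.insert ip.2 (if PySem.Int.band (code >>> ip.1.toNat) 1 ≠ 0 then "lsb" else "msb"))
        PySem.Dict.empty).items)

-- ===== PRECONDITION & SPEC =====
def Spec_all_port_orderings_py (ports : List String) (out : List (List (String × String))) : Prop := out = all_port_orderings_py_alt ports
instance (ports : List String) (out : List (List (String × String))) : Decidable (Spec_all_port_orderings_py ports out) := by unfold Spec_all_port_orderings_py; infer_instance

-- ===== CLAIM (what is proved, stated in full; the proofs are below) =====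
def Claim_equal_all_port_orderings_py : Prop := ∀ (ports : List String), Dom_all_port_orderings_py ports → Spec_all_port_orderings_py ports (all_port_orderings_py ports)

-- ===== LEMMAS AND PROOFS =====

-- proof-side reference: the dict B's comprehension builds for a given code,
-- written as a structural recursion (head inserted last, tail decoded from code >>> 1)
def pvBDict : List String → Int → PySem.Dict String String
  | [], _ => PySem.Dict.empty
  | h :: t, code =>
      (pvBDict t (code >>> (1 : Nat))).insert h
        (if PySem.Int.band code 1 ≠ 0 then "lsb" else "msb")

theorem pv_shift_add (a : Int) (m k : Nat) : a >>> m >>> k = a >>> (m + k) := by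
  simp [Int.shiftRight_eq_div_pow, pow_add, Int.ediv_ediv_of_nonneg]

-- B's reversed-enumerate fold equals the reference recursion
theorem pv_fold_eq_bdict (t : List String) (s : Nat) (code : Int)  :
    (PySem.List.enumerate t (s : Int)).reverse.foldl
        (fun d ip =>
          d.insert ip.2 (if PySem.Int.band (code >>> ip.1.toNat) 1 ≠ 0 then "lsb" else "msb"))
        PySem.Dict.empty
      = pvBDict t (code >>> s) := by
  induction t generalizing s with
  | nil => simp [PySem.List.enumerate_nil, pvBDict]
  | cons h tl ih =>
      rw [PySem.List.enumerate_cons]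
      have hs : ((s : Int) + 1) = ((s + 1 : Nat) : Int) := by push_cast; ring
      simp only [List.reverse_cons, List.foldl_append, List.foldl_cons, List.foldl_nil, hs,
        ih (s + 1), pvBDict, Int.toNat_natCast, ← pv_shift_add]
      rfl

theorem pv_bdict_even (h : String) (t : List String) (q : Int) :
    pvBDict (h :: t) (2 * q) = (pvBDict t q).insert h "msb" := by
  have h1 : (2 * q) >>> (1 : Nat) = q := by simp [Int.shiftRight_eq_div_pow]
  have h2 : PySem.Int.band (2 * q) 1 = 0 := by
    rw [PySem.Int.band_one, PySem.Int.mod_eq_emod_of_pos (by omega)]; omega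
  simp [pvBDict, h1, h2]

theorem pv_bdict_odd (h : String) (t : List String) (q : Int) :
    pvBDict (h :: t) (2 * q + 1) = (pvBDict t q).insert h "lsb" := by
  have h1 : (2 * q + 1) >>> (1 : Nat) = q := by simp [Int.shiftRight_eq_div_pow]; omega
  have h2 : PySem.Int.band (2 * q + 1) 1 = 1 := by
    rw [PySem.Int.band_one, PySem.Int.mod_eq_emod_of_pos (by omega)]; omega
  simp [pvBDict, h1, h2]

-- range(0, 2*M) enumerated as the pairs (2q, 2q+1) for q in range(0, M)
theorem pv_range_double (M : Nat) :
    PySem.List.pyRange 0 (2 * (M : Int)) 1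
      = (PySem.List.pyRange 0 (M : Int) 1).flatMap (fun q => [2 * q, 2 * q + 1]) := by
  induction M with
  | zero => simp [PySem.List.pyRange_one_eq_nil]
  | succ m ih =>
      have hm : ((m + 1 : Nat) : Int) = (m : Int) + 1 := by push_cast; ring
      have e2 : (2 : Int) * ((m : Int) + 1) = (2 * (m : Int) + 1) + 1 := by ring
      rw [hm, e2, PySem.List.pyRange_one_succ_right (by omega),
        PySem.List.pyRange_one_succ_right (by omega),
        PySem.List.pyRange_one_succ_right (by omega), ih, List.flatMap_append]
      simp

theorem pv_B_eq (ports : List String) :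
    all_port_orderings_py_alt ports
      = (PySem.List.pyRange 0 ((2 : Int) ^ ports.length) 1).map
          (fun code => (pvBDict ports code).items) := by
  unfold all_port_orderings_py_alt
  have h1 : ((1 : Int) <<< ports.length) = (2 : Int) ^ ports.length := by
    simp [Int.shiftLeft_eq]
  have h0 : ∀ code : Int, code >>> (0 : Nat) = code := by
    intro code; simp [Int.shiftRight_eq_div_pow]
  rw [h1]
  refine List.map_congr_left (fun code _ => ?_)
  have hfold := pv_fold_eq_bdict ports 0 code
  simp only [Nat.cast_zero, h0] at hfold
  rw [hfold]

theorem pv_A_eq (ports : List String) :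
    all_port_orderings_py ports
      = (PySem.List.pyRange 0 ((2 : Int) ^ ports.length) 1).map
          (fun code => (pvBDict ports code).items) := by
  induction ports with
  | nil =>
      rw [show ((2 : Int) ^ ([] : List String).length) = 0 + 1 by norm_num,
        PySem.List.pyRange_one_singleton]
      rfl
  | cons h t ih =>
      show (all_port_orderings_py t).foldl _ [] = _
      have inner : ∀ (acc : List (List (String × String))) (rest : List (String × String)),
          (["msb", "lsb"].foldl
            (fun orderings order =>
              orderings ++ [((PySem.Dict.mk rest).insert h order).items]) acc)
          = acc ++ [((PySem.Dict.mk rest).insert h "msb").items,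
                    ((PySem.Dict.mk rest).insert h "lsb").items] := by
        intro acc rest; simp [List.foldl]
      calc (all_port_orderings_py t).foldl
            (fun orderings rest =>
              ["msb", "lsb"].foldl
                (fun orderings order =>
                  orderings ++ [((PySem.Dict.mk rest).insert h order).items]) orderings) []
          = (all_port_orderings_py t).foldl
            (fun orderings rest =>
              orderings ++ [((PySem.Dict.mk rest).insert h "msb").items,
                            ((PySem.Dict.mk rest).insert h "lsb").items]) [] := by
            exact PySem.List.foldl_congr_mem _ _ _ _ (fun acc rest _ => inner acc rest)
        _ = (all_port_orderings_py t).flatMap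
              (fun rest => [((PySem.Dict.mk rest).insert h "msb").items,
                            ((PySem.Dict.mk rest).insert h "lsb").items]) := by
            rw [PySem.List.foldl_append_eq_flatMap]; rfl
        _ = (PySem.List.pyRange 0 ((2 : Int) ^ t.length) 1).flatMap
              (fun q => [((pvBDict t q).insert h "msb").items,
                         ((pvBDict t q).insert h "lsb").items]) := by
            rw [ih, List.flatMap_map]
        _ = (PySem.List.pyRange 0 ((2 : Int) ^ (h :: t).length) 1).map
              (fun code => (pvBDict (h :: t) code).items) := by
            have hp : ((2 : Int) ^ (h :: t).length) = 2 * (((2 ^ t.length : Nat)) : Int) := by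
              push_cast; rw [List.length_cons, pow_succ]; ring
            rw [hp, pv_range_double,
              show ((((2 ^ t.length : Nat)) : Int)) = (2 : Int) ^ t.length by push_cast; rfl,
              List.map_flatMap]
            refine List.flatMap_congr (fun q _ => ?_)
            simp [pv_bdict_even, pv_bdict_odd]

-- ===== VERDICT (by name: the statement is the Claim_ definition above) =====
theorem all_port_orderings_py_spec : Claim_equal_all_port_orderings_py := by
  intro ports _
  unfold Spec_all_port_orderings_py
  rw [pv_A_eq, pv_B_eq]
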